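-- pv_equiv track=rewrite | github.com/lukaszd95/build- | utils/document_classifier.py | _ocr_tolerant_text
-- ===== SOURCE A (Python) =====
-- def _ocr_tolerant_text(text: str) -> str:
--     text = text.lower()
--     repl = {
--         "1": "i",
--         "0": "o",
--         "3": "e",
--         "4": "a",
--         "5": "s",
--         "2": "z",
--         "8": "b",
--     }
--     for src, dst in repl.items():
--         text = text.replace(src, dst)
--     return text
-- ===== SOURCE B (Python) =====
-- # B: single pass over the lowercased text, substituting each character once,
-- # instead of A's seven whole-string replace() scans.
--
-- def _sub(c):
--     if c == "1":
--         return "i"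
--     elif c == "0":
--         return "o"
--     elif c == "3":
--         return "e"
--     elif c == "4":
--         return "a"
--     elif c == "5":
--         return "s"
--     elif c == "2":
--         return "z"
--     elif c == "8":
--         return "b"
--     else:
--         return c
--
--
-- def _ocr_tolerant_text(text: str) -> str:
--     return "".join(_sub(c) for c in text.lower())
-- ===== Notes on version B (the rewrite author's own statement) =====
-- stated objective: alternative
-- what changed: Replaced A's seven sequential whole-string replace() passes with a single character-by-character pass over the lowercased text that emits each character's substitution directly.
import Mathlib
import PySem

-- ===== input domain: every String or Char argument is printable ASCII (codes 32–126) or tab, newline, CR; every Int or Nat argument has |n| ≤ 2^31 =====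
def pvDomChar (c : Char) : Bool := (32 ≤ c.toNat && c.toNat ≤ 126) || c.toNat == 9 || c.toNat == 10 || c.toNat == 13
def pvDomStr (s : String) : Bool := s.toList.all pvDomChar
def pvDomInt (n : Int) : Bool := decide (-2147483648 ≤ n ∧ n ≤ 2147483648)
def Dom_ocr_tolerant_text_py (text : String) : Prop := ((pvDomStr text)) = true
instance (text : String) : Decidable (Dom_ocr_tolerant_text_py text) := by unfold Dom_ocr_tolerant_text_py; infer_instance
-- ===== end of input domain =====

-- B replaces A's seven sequential whole-string replace() passes with one
-- character-by-character substitution pass over the lowercased text (alternative decomposition).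

-- ===== PORT A =====
-- A: lowercase, then apply text.replace(src, dst) for each of the seven
-- dict items in insertion order (the dict ported as its items list).
def ocr_tolerant_text_py (text : String) : String :=
  let t := PySem.Str.lower text
  let repl : List (String × String) :=
    [("1", "i"), ("0", "o"), ("3", "e"), ("4", "a"), ("5", "s"), ("2", "z"), ("8", "b")]
  repl.foldl (fun s p => PySem.Str.replace s p.1 p.2) t

-- ===== PORT B =====
-- helper _sub of Source B; it always returns a one-character string, so the
-- ''.join over the characters of the lowered text is exactly this map.
def pySub_ocr (c : Char) : Char :=
  if c = '1' then 'i' else if c = '0' then 'o' else if c = '3' then 'e'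
  else if c = '4' then 'a' else if c = '5' then 's' else if c = '2' then 'z'
  else if c = '8' then 'b' else c

def ocr_tolerant_text_py_alt (text : String) : String :=
  String.ofList ((PySem.Str.lower text).toList.map pySub_ocr)

-- ===== PRECONDITION & SPEC =====
def Spec_ocr_tolerant_text_py (text : String) (out : String) : Prop := out = ocr_tolerant_text_py_alt text
instance (text : String) (out : String) : Decidable (Spec_ocr_tolerant_text_py text out) := by unfold Spec_ocr_tolerant_text_py; infer_instance

-- ===== CLAIM (what is proved, stated in full; the proofs are below) =====
def Claim_equal_ocr_tolerant_text_py : Prop := ∀ (text : String), Dom_ocr_tolerant_text_py text → Spec_ocr_tolerant_text_py text (ocr_tolerant_text_py text)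

-- ===== LEMMAS AND PROOFS =====

-- replace.go with a single-character pattern and replacement is a map (fuel-sufficient invariant)
lemma replace_go_single (o d : Char) : ∀ (l acc : List Char) (fuel : Nat), l.length ≤ fuel →
    PySem.Chars.replace.go [o] [d] fuel l acc = acc.reverse ++ l.map (fun c => if c = o then d else c) := by
  intro l
  induction l with
  | nil => intro acc fuel h; cases fuel <;> simp [PySem.Chars.replace.go]
  | cons c t ih =>
    intro acc fuel h
    cases fuel with
    | zero => simp at h
    | succ n =>
      simp only [PySem.Chars.replace.go]
      by_cases hc : c = o
      · subst hc
        have hp : [c].isPrefixOf (c :: t) = true := by simp [List.isPrefixOf]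
        rw [if_pos hp]
        simp only [List.length_cons, List.length_nil, Nat.zero_add, List.drop_one,
          List.tail_cons, List.reverse_singleton]
        rw [List.singleton_append, ih (d :: acc) n (by simpa using h)]
        simp
      · have hp : [o].isPrefixOf (c :: t) = false := by
          simp [List.isPrefixOf]; exact fun h' => (hc h'.symm).elim
        rw [if_neg (by simp [hp]), ih (c :: acc) n (by simpa using h)]
        simp [hc]

-- s.replace(old, new) with single-character old/new substitutes character-wise
lemma replace_single (s : List Char) (o d : Char) :
    PySem.Chars.replace s [o] [d] = s.map (fun c => if c = o then d else c) := by
  simp [PySem.Chars.replace, replace_go_single o d s [] s.length le_rfl]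

-- A's seven substitutions composed are B's single substitution (no target is a source)
lemma comp_subst_eq (c : Char) :
    ((fun c => if c = '8' then 'b' else c) ∘ (fun c => if c = '2' then 'z' else c) ∘
      (fun c => if c = '5' then 's' else c) ∘ (fun c => if c = '4' then 'a' else c) ∘
      (fun c => if c = '3' then 'e' else c) ∘ (fun c => if c = '0' then 'o' else c) ∘
      (fun c => if c = '1' then 'i' else c)) c = pySub_ocr c := by
  by_cases h1 : c = '1'; · subst h1; decide
  by_cases h2 : c = '0'; · subst h2; decide
  by_cases h3 : c = '3'; · subst h3; decide
  by_cases h4 : c = '4'; · subst h4; decide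
  by_cases h5 : c = '5'; · subst h5; decide
  by_cases h6 : c = '2'; · subst h6; decide
  by_cases h7 : c = '8'; · subst h7; decide
  simp [pySub_ocr, h1, h2, h3, h4, h5, h6, h7]

-- ===== VERDICT (by name: the statement is the Claim_ definition above) =====
theorem ocr_tolerant_text_py_spec : Claim_equal_ocr_tolerant_text_py := by
  intro text _
  unfold Spec_ocr_tolerant_text_py ocr_tolerant_text_py ocr_tolerant_text_py_alt
  rw [← String.toList_inj]
  simp only [List.foldl, PySem.Str.toList_replace]
  simp only [show ("1":String).toList = ['1'] from rfl, show ("i":String).toList = ['i'] from rfl,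
    show ("0":String).toList = ['0'] from rfl, show ("o":String).toList = ['o'] from rfl,
    show ("3":String).toList = ['3'] from rfl, show ("e":String).toList = ['e'] from rfl,
    show ("4":String).toList = ['4'] from rfl, show ("a":String).toList = ['a'] from rfl,
    show ("5":String).toList = ['5'] from rfl, show ("s":String).toList = ['s'] from rfl,
    show ("2":String).toList = ['2'] from rfl, show ("8":String).toList = ['8'] from rfl,
    show ("z":String).toList = ['z'] from rfl, show ("b":String).toList = ['b'] from rfl]
  simp only [replace_single, List.map_map]
  simp only [String.toList_ofList]
  exact List.map_congr_left (fun c _ => comp_subst_eq c)
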